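-- pv_equiv track=rewrite | github.com/Ajiens/diacritization-api | app/addabit_diacritic.py | _group_word_units
-- ===== SOURCE A (Python) =====
-- from typing import Dict, List, Tuple
--
-- def _group_word_units(input_tokens: List[str]) -> List[List[str]]:
--     """Group tokens into ``[word, MASK, MASK, ...]`` units."""
--     units: List[List[str]] = []
--     current: List[str] = []
--     for token in input_tokens:
--         if token != "[MASK]" and current:
--             units.append(current)
--             current = []
--         current.append(token)
--     if current:
--         units.append(current)
--     return units
-- ===== SOURCE B (Python) =====
-- from typing import List
--
-- def _group_word_units(input_tokens: List[str]) -> List[List[str]]: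
--     """Group tokens into ``[word, MASK, MASK, ...]`` units."""
--     units: List[List[str]] = []
--     i, n = 0, len(input_tokens)
--     while i < n:
--         j = i + 1
--         while j < n and input_tokens[j] == "[MASK]":
--             j += 1
--         units.append(input_tokens[i:j])
--         i = j
--     return units
-- ===== Notes on version B (the rewrite author's own statement) =====
-- stated objective: alternative
-- what changed: Replaces A's accumulate-into-a-buffer-then-flush loop over tokens with an index scan that finds each unit's end (the run of following [MASK] tokens) and emits the slice directly, with no buffer or flush step.
import Mathlib
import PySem

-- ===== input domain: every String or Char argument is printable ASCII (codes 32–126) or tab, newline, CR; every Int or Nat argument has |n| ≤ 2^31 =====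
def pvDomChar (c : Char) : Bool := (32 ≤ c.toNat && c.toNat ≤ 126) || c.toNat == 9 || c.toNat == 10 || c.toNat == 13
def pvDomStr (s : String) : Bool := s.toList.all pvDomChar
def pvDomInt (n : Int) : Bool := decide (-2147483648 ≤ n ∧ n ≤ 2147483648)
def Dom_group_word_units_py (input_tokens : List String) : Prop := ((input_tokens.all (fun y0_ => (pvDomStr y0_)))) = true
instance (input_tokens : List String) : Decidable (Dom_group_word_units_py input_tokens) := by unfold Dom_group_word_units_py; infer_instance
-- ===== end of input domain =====

-- B replaces A's accumulate-into-a-buffer-then-flush loop with an index scan that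
-- finds each unit's end (the run of following [MASK] tokens) and emits the slice
-- directly (objective: alternative decomposition, same cost).


-- ===== PORT A =====
-- loop body of A: flush `current` into `units` on a non-MASK token, then append the token
def gwuStep (st : List (List String) × List String) (token : String) :
    List (List String) × List String :=
  let (units, current) := st
  let (units, current) :=
    if token ≠ "[MASK]" ∧ current ≠ [] then (units ++ [current], ([] : List String))
    else (units, current)
  (units, current ++ [token])

def group_word_units_py (input_tokens : List String) : List (List String) :=
  let st := input_tokens.foldl gwuStep ([], [])
  if st.2 ≠ [] then st.1 ++ [st.2] else st.1

-- ===== PORT B =====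
-- B scans from each unit start: the unit is the token plus the run of following
-- "[MASK]" tokens (the inner `while j < n and input_tokens[j] == "[MASK]"` =
-- takeWhile on the suffix); the next start is past that run (dropWhile).
def group_word_units_py_alt (input_tokens : List String) : List (List String) :=
  match input_tokens with
  | [] => []
  | t :: rest =>
      (t :: rest.takeWhile (· == "[MASK]")) ::
        group_word_units_py_alt (rest.dropWhile (· == "[MASK]"))
termination_by input_tokens.length
decreasing_by
  simpa using Nat.lt_succ_of_le (List.length_dropWhile_le (· == "[MASK]") rest)

-- ===== PRECONDITION & SPEC =====
def Spec_group_word_units_py (input_tokens : List String) (out : List (List String)) : Prop := out = group_word_units_py_alt input_tokens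
instance (input_tokens : List String) (out : List (List String)) : Decidable (Spec_group_word_units_py input_tokens out) := by unfold Spec_group_word_units_py; infer_instance

-- ===== CLAIM (what is proved, stated in full; the proofs are below) =====
def Claim_equal_group_word_units_py : Prop := ∀ (input_tokens : List String), Dom_group_word_units_py input_tokens → Spec_group_word_units_py input_tokens (group_word_units_py input_tokens)

-- ===== LEMMAS AND PROOFS =====

-- finish step of A (after the loop)
def gwuFinish (st : List (List String) × List String) : List (List String) :=
  if st.2 ≠ [] then st.1 ++ [st.2] else st.1

-- Invariant of A's loop: with a nonempty buffer `cur`, the finished fold equals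
-- `units` followed by `cur` extended by the leading masks, then B's grouping of the rest.
theorem gwu_loop_inv (toks : List String) :
    ∀ (units : List (List String)) (cur : List String), cur ≠ [] →
    gwuFinish (toks.foldl gwuStep (units, cur)) =
      units ++ ((cur ++ toks.takeWhile (· == "[MASK]")) ::
        group_word_units_py_alt (toks.dropWhile (· == "[MASK]"))) := by
  induction toks with
  | nil =>
      intro units cur hcur
      simp [gwuFinish, group_word_units_py_alt, hcur]
  | cons t rest ih =>
      intro units cur hcur
      by_cases ht : t = "[MASK]"
      · subst ht
        have hstep : gwuStep (units, cur) "[MASK]" = (units, cur ++ ["[MASK]"]) := by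
          simp [gwuStep]
        rw [List.foldl_cons, hstep, ih units (cur ++ ["[MASK]"]) (by simp)]
        simp [List.takeWhile, List.dropWhile]
      · have hb : (t == "[MASK]") = false := by simp [ht]
        have hstep : gwuStep (units, cur) t = (units ++ [cur], [t]) := by
          simp [gwuStep, ht, hcur]
        rw [List.foldl_cons, hstep, ih (units ++ [cur]) [t] (by simp)]
        simp [group_word_units_py_alt, List.takeWhile, List.dropWhile, hb]

-- ===== VERDICT (by name: the statement is the Claim_ definition above) =====
theorem group_word_units_py_spec : Claim_equal_group_word_units_py := by
  intro input_tokens _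
  unfold Spec_group_word_units_py
  cases input_tokens with
  | nil => simp [group_word_units_py, group_word_units_py_alt]
  | cons t rest =>
      have hstep : gwuStep ([], []) t = ([], [t]) := by simp [gwuStep]
      show gwuFinish ((t :: rest).foldl gwuStep ([], [])) = _
      rw [List.foldl_cons, hstep, gwu_loop_inv rest [] [t] (by simp)]
      simp [group_word_units_py_alt]
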